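-- pv_equiv track=rewrite | github.com/Derunv/prjctr | Hometask/Task_8/Cat_task.py | start_circle
-- ===== SOURCE A (Python) =====
-- def generate_cat_circle(cats: int = 100) -> list:
--     cat_circle = []
--     for i in range(cats):
--         cat_circle.append([i+1, 'hat_off'])
--     return cat_circle
--
-- def cat_round_rolls(data: list) -> list:
--     cat, hat = data
--     if hat == 'hat_off':
--         return [cat, 'hat_on']
--     else:
--         return [cat, 'hat_off']
--
-- def start_circle(rounds: int = 100, cats: int = 100) -> list:
--     cat_circle = generate_cat_circle(cats)
--     if rounds > cats:
--         raise ValueError(f'You can`t run {rounds} rounds, you have {cats} cats! Please try again. '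
--                          f'Cats must be greater (or equal) than rounds. ')
--     for i in range(rounds):
--         for j in cat_circle[i::i+1]:
--             cat_circle[j[0]-1] = cat_round_rolls(j)
--     return cat_circle
-- ===== SOURCE B (Python) =====
-- def start_circle(rounds: int = 100, cats: int = 100) -> list:
--     if rounds > cats:
--         raise ValueError(f'You can`t run {rounds} rounds, you have {cats} cats! Please try again. '
--                          f'Cats must be greater (or equal) than rounds. ')
--     return [[n, 'hat_on' if sum(1 for d in range(1, rounds + 1) if n % d == 0) % 2 == 1 else 'hat_off']
--             for n in range(1, cats + 1)]
-- ===== Notes on version B (the rewrite author's own statement) =====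
-- stated objective: simpler
-- what changed: Replaces the in-place slice-stride toggling over a mutable cat list with a direct per-cat divisor-count: cat n wears the hat iff its number of divisors in 1..rounds is odd.
import Mathlib
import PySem

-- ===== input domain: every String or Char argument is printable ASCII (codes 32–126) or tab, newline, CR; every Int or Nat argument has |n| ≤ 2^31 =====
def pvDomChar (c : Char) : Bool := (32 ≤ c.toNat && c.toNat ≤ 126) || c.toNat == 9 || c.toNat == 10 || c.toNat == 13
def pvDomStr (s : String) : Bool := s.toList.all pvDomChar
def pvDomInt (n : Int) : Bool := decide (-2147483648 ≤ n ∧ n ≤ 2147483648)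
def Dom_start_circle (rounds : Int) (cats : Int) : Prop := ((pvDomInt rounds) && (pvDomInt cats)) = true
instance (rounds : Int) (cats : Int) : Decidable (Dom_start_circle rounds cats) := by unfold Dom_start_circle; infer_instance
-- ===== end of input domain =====

-- B replaces A's in-place slice-stride toggling with a direct per-cat divisor-count (simpler; same values).

-- ===== PORT A =====
def generate_cat_circle (cats : Int) : List (Int × String) :=
  (PySem.List.pyRange 0 cats 1).foldl (fun acc i => acc ++ [(i + 1, "hat_off")]) []

def cat_round_rolls (data : Int × String) : Int × String :=
  if data.2 == "hat_off" then (data.1, "hat_on") else (data.1, "hat_off")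

-- Python raises ValueError when rounds > cats; those inputs are excluded by Pre_.
-- slice? never returns none here (step = i+1 ≥ 1), so `.getD []` is exact;
-- list assignment cat_circle[j[0]-1] = … is pySetD (the index j[0]-1 is always a valid position).
def start_circle (rounds : Int) (cats : Int) : List (Int × String) :=
  let cat_circle := generate_cat_circle cats
  (PySem.List.pyRange 0 rounds 1).foldl
    (fun cc i =>
      ((PySem.List.slice? cc (some i) none (i + 1)).getD []).foldl
        (fun cc' j => PySem.List.pySetD cc' (j.1 - 1) (cat_round_rolls j)) cc)
    cat_circle

-- ===== PORT B =====
def start_circle_alt (rounds : Int) (cats : Int) : List (Int × String) :=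
  (PySem.List.pyRange 1 (cats + 1) 1).map (fun n =>
    (n, if ((PySem.List.pyRange 1 (rounds + 1) 1).countP
              (fun d => PySem.Int.mod n d == 0)) % 2 = 1
        then "hat_on" else "hat_off"))

-- ===== PRECONDITION & SPEC =====
-- Pre_ excludes exactly rounds > cats, where Python A raises ValueError.
def Pre_start_circle (rounds : Int) (cats : Int) : Prop := rounds ≤ cats
instance (rounds : Int) (cats : Int) : Decidable (Pre_start_circle rounds cats) := by unfold Pre_start_circle; infer_instance
def pvWitness_start_circle : Int × Int := (3, 5)

def Spec_start_circle (rounds : Int) (cats : Int) (out : List (Int × String)) : Prop := out = start_circle_alt rounds cats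
instance (rounds : Int) (cats : Int) (out : List (Int × String)) : Decidable (Spec_start_circle rounds cats out) := by unfold Spec_start_circle; infer_instance

-- ===== CLAIM (what is proved, stated in full; the proofs are below) =====
def Claim_equal_start_circle : Prop := ∀ (rounds : Int) (cats : Int), Dom_start_circle rounds cats → Pre_start_circle rounds cats → Spec_start_circle rounds cats (start_circle rounds cats)

-- ===== LEMMAS AND PROOFS =====

-- hat string as a function of "toggled an odd number of times"
def pvHat (b : Bool) : String := if b then "hat_on" else "hat_off"

-- parity of the number of divisors of n among 1..k
def pvOdd (k n : Nat) : Bool := (List.range k).countP (fun d => (d + 1) ∣ n) % 2 = 1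

-- the common intermediate value: the circle after k rounds
def pvState (L k : Nat) : List (Int × String) :=
  (List.range L).map (fun (p : Nat) => ((p : Int) + 1, pvHat (pvOdd k (p + 1))))

lemma pv_rolls_hat (n : Int) (b : Bool) :
    cat_round_rolls (n, pvHat b) = (n, pvHat (!b)) := by
  cases b <;> simp [cat_round_rolls, pvHat]

lemma pvOdd_succ (k n : Nat) :
    pvOdd (k + 1) n = if (k + 1) ∣ n then !pvOdd k n else pvOdd k n := by
  unfold pvOdd
  rw [List.range_succ, List.countP_append]
  by_cases h : (k + 1) ∣ n
  · simp only [h, if_pos]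
    rcases Nat.even_or_odd ((List.range k).countP (fun d => decide ((d + 1) ∣ n))) with he | ho
    · rw [Nat.even_iff] at he; simp [h, he]; omega
    · rw [Nat.odd_iff] at ho; simp [h, ho]; omega
  · simp [h]

lemma pv_set_map_range {α : Type} (L n : Nat) (g : Nat → α) (v : α) :
    (((List.range L).map g).set n v) = (List.range L).map (fun p => if p = n then v else g p) := by
  apply List.ext_getElem
  · simp
  · intro k h1 h2
    by_cases he : n = k
    · subst he; simp
    · simp [he, Ne.symm he]

-- slice with positive stride out of a map-over-range list
lemma pv_slice_map_range {α : Type} (L i : Nat) (f : Nat → α) :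
    PySem.List.slice? ((List.range L).map f) (some (i : Int)) none ((i : Int) + 1)
      = some ((List.range (L / (i + 1))).map (fun k => f (i + (i + 1) * k))) := by
  have hstep : ((i:Int) + 1) ≠ 0 := by omega
  have hnotlt : ¬ ((i:Int) + 1 < 0) := by omega
  have hpos : (0:Int) < (i:Int) + 1 := by omega
  have hge : ¬ ((i:Int) < 0) := by omega
  simp only [PySem.List.slice?, PySem.List.sliceIndices, hstep, if_neg hnotlt,
    if_pos hpos, if_neg hge, List.length_map, List.length_range, if_false]
  by_cases hiL : i < L
  · have hmin : min (i:Int) (L:Int) = (i:Int) := by omega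
    simp only [hmin]
    rw [if_pos (show (i:Int) < (L:Int) by exact_mod_cast hiL)]
    rw [show ((L:Int) - (i:Int) + ((i:Int) + 1) - 1) = (L:Int) by ring]
    rw [show (((L:Int)) / ((i:Int) + 1)).toNat = L / (i + 1) by norm_cast]
    congr 1
    have hbound : ∀ x ∈ List.range (L / (i + 1)), i + (i + 1) * x < L := by
      intro x hx
      simp only [List.mem_range] at hx
      have h2 : (x + 1) * (i + 1) ≤ L := (Nat.le_div_iff_mul_le (by omega)).1 (by omega)
      have h3 : (x + 1) * (i + 1) = (i + 1) * x + i + 1 := by ring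
      omega
    calc List.filterMap (fun (x : Nat) => (List.map f (List.range L))[((i:Int) + ((i:Int) + 1) * (x:Int)).toNat]?) (List.range (L / (i + 1)))
        = List.filterMap (fun (x : Nat) => some (f (i + (i + 1) * x))) (List.range (L / (i + 1))) := by
          apply List.filterMap_congr
          intro x hx
          have hidx : ((i:Int) + ((i:Int) + 1) * (x:Int)).toNat = i + (i + 1) * x := by
            have : ((i:Int) + 1) * (x:Int) = (((i+1)*x : Nat) : Int) := by push_cast; ring
            rw [this]; omega
          rw [hidx, List.getElem?_map, List.getElem?_range (hbound x hx)]
          rfl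
      _ = List.map (fun k => f (i + (i + 1) * k)) (List.range (L / (i + 1))) := by
          simp
  · have hmin : min (i:Int) (L:Int) = (L:Int) := by omega
    have hdiv : L / (i + 1) = 0 := Nat.div_eq_of_lt (by omega)
    simp [hmin, hdiv]

-- setting captured values back: folding set over a list of positions
lemma pv_foldl_set {α : Type} (us : List Nat) (g : Nat → α) (v : Nat → α) (L : Nat) :
    us.foldl (fun cc u => cc.set u (v u)) ((List.range L).map g)
      = (List.range L).map (fun p => if p ∈ us then v p else g p) := by
  induction us generalizing g with
  | nil => simp
  | cons u rest ih =>
    simp only [List.foldl_cons]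
    rw [pv_set_map_range L u g (v u)]
    rw [ih]
    apply List.map_congr_left
    intro p _
    by_cases hr : p ∈ rest
    · simp [hr]
    · by_cases hu : p = u <;> simp [hr, hu]

-- the membership test: p = i + (i+1)*k for some k < L/(i+1)  ↔  (i+1) ∣ (p+1), given p < L
lemma pv_mem_stride (L i p : Nat) (hp : p < L) :
    (p ∈ (List.range (L / (i + 1))).map (fun k => i + (i + 1) * k)) ↔ (i + 1) ∣ (p + 1) := by
  simp only [List.mem_map, List.mem_range]
  constructor
  · rintro ⟨k, _, rfl⟩
    exact ⟨k + 1, by ring⟩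
  · rintro ⟨m, hm⟩
    have hm1 : 1 ≤ m := by
      rcases Nat.eq_zero_or_pos m with h | h
      · subst h; simp at hm
      · exact h
    obtain ⟨m', rfl⟩ : ∃ m', m = m' + 1 := ⟨m - 1, by omega⟩
    have hmul : (i + 1) * (m' + 1) = (i + 1) * m' + (i + 1) := by ring
    have h2 : (m' + 1) * (i + 1) ≤ L := by rw [Nat.mul_comm]; omega
    have := (Nat.le_div_iff_mul_le (by omega : 0 < i + 1)).2 h2
    refine ⟨m', by omega, by omega⟩

-- one round: round k toggles exactly the cats whose number is divisible by k+1
lemma pv_round (L k : Nat) :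
    (((PySem.List.slice? (pvState L k) (some (k:Int)) none ((k:Int) + 1)).getD []).foldl
        (fun cc' j => PySem.List.pySetD cc' (j.1 - 1) (cat_round_rolls j)) (pvState L k))
      = pvState L (k + 1) := by
  unfold pvState
  rw [pv_slice_map_range]
  simp only [Option.getD_some]
  rw [show (List.range (L / (k + 1))).map
        (fun k' => ((((k + (k + 1) * k' : Nat)) : Int) + 1, pvHat (pvOdd k ((k + (k + 1) * k') + 1))))
      = ((List.range (L / (k + 1))).map (fun k' => k + (k + 1) * k')).map
        (fun (p : Nat) => ((p : Int) + 1, pvHat (pvOdd k (p + 1)))) by rw [List.map_map]; rfl]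
  rw [List.foldl_map]
  have hbody : ∀ (cc : List (Int × String)) (u : Nat),
      PySem.List.pySetD cc ((((u : Int) + 1, pvHat (pvOdd k (u + 1))) : Int × String).1 - 1)
          (cat_round_rolls ((u : Int) + 1, pvHat (pvOdd k (u + 1))))
        = cc.set u (cat_round_rolls ((u : Int) + 1, pvHat (pvOdd k (u + 1)))) := by
    intro cc u
    have : ((u : Int) + 1 - 1) = (u : Int) := by omega
    rw [show (((u : Int) + 1, pvHat (pvOdd k (u + 1))) : Int × String).1 = (u : Int) + 1 from rfl, this]
    simp
  simp only [hbody]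
  rw [pv_foldl_set]
  apply List.map_congr_left
  intro p hp
  simp only [List.mem_range] at hp
  simp only [pv_mem_stride L k p hp, pvOdd_succ]
  by_cases h : (k + 1) ∣ (p + 1)
  · simp [h, pv_rolls_hat]
  · simp [h]

-- the full outer loop, for a Nat number of rounds
lemma pv_outer (L r : Nat) :
    (PySem.List.pyRange 0 (r : Int) 1).foldl
      (fun cc i =>
        ((PySem.List.slice? cc (some i) none (i + 1)).getD []).foldl
          (fun cc' j => PySem.List.pySetD cc' (j.1 - 1) (cat_round_rolls j)) cc)
      (pvState L 0) = pvState L r := by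
  induction r with
  | zero => simp [PySem.List.pyRange_one_eq_nil]
  | succ r ih =>
    rw [show ((r + 1 : Nat) : Int) = (r : Int) + 1 by push_cast; ring]
    rw [PySem.List.pyRange_one_succ_right (by omega : (0:Int) ≤ (r:Int))]
    rw [List.foldl_append, ih]
    simp only [List.foldl_cons, List.foldl_nil]
    exact pv_round L r

lemma pv_generate (cats : Int) : generate_cat_circle cats = pvState cats.toNat 0 := by
  unfold generate_cat_circle pvState
  rw [PySem.List.foldl_append_singleton_eq_map]
  rw [PySem.List.pyRange_one, List.map_map, List.nil_append,
      show (cats - 0).toNat = cats.toNat by norm_num]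
  apply List.map_congr_left
  intro k _
  simp [pvOdd, pvHat]

lemma pv_alt_eq (rounds cats : Int) :
    start_circle_alt rounds cats = pvState cats.toNat rounds.toNat := by
  unfold start_circle_alt pvState
  rw [PySem.List.pyRange_one 1 (cats + 1), show (cats + 1 - 1).toNat = cats.toNat by omega,
      List.map_map]
  apply List.map_congr_left
  intro p _
  refine Prod.ext (by simp; ring) ?_
  have hcnt : (PySem.List.pyRange 1 (rounds + 1) 1).countP
        (fun d => PySem.Int.mod (1 + (p : Int)) d == 0)
      = (List.range rounds.toNat).countP (fun d => (d + 1) ∣ (p + 1)) := by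
    rw [PySem.List.pyRange_one 1 (rounds + 1), show (rounds + 1 - 1).toNat = rounds.toNat by omega,
        List.countP_map]
    apply List.countP_congr
    intro d _
    have : (1 + (d : Int)) ∣ (1 + (p : Int)) ↔ (d + 1) ∣ (p + 1) := by
      rw [show (1 + (d : Int)) = ((d + 1 : Nat) : Int) by push_cast; ring,
          show (1 + (p : Int)) = ((p + 1 : Nat) : Int) by push_cast; ring]
      exact Int.natCast_dvd_natCast
    simp [Function.comp, PySem.Int.mod_eq_zero_iff_dvd, this]
  simp only [pvHat, pvOdd]
  by_cases h : (List.range rounds.toNat).countP (fun d => (d + 1) ∣ (p + 1)) % 2 = 1 <;>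
    simp [h] <;> omega

lemma pv_A_eq (rounds cats : Int) :
    start_circle rounds cats = pvState cats.toNat rounds.toNat := by
  unfold start_circle
  rw [pv_generate]
  by_cases h0 : 0 ≤ rounds
  · rw [show rounds = ((rounds.toNat : Int)) by omega]
    exact pv_outer cats.toNat rounds.toNat
  · rw [PySem.List.pyRange_one_eq_nil (by omega : rounds ≤ 0), List.foldl_nil,
        show rounds.toNat = 0 by omega]

-- ===== VERDICT (by name: the statement is the Claim_ definition above) =====
theorem start_circle_spec : Claim_equal_start_circle := by
  intro rounds cats _ _
  unfold Spec_start_circle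
  rw [pv_A_eq, pv_alt_eq]
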